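-- pv_equiv track=rewrite | github.com/maxis42/Data-Structures-and-Algorithms-Coursera-UCSD-HSE | 3 Algorithms on Graph/Homeworks/Week 2/2_order_of_courses/toposort.py | get_adj_list_and_sources
-- ===== SOURCE A (Python) =====
-- def get_adj_list_and_sources(n, edges):
--     adj_list = {i: [] for i in range(n)}
--     sources = [True for _ in range(n)]
--     for v_start, v_end in edges:
--         adj_list[v_start].append(v_end)
--         sources[v_end] = False
--
--     sources = tuple([i for i in range(n) if sources[i]])
--     return adj_list, sources
-- ===== SOURCE B (Python) =====
-- def get_adj_list_and_sources(n, edges):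
--     indegree = [0] * n
--     for _, t in edges:
--         indegree[t] += 1
--     adj_list = {i: [t for s, t in edges if s == i] for i in range(n)}
--     return adj_list, tuple(i for i in range(n) if indegree[i] == 0)
-- ===== Notes on version B (the rewrite author's own statement) =====
-- stated objective: alternative
-- what changed: B drops A's fused single pass (dict-append plus boolean source flags) entirely: it counts in-degrees in one dedicated pass and tests count==0 for sources, and builds each adjacency row by its own per-vertex grouping comprehension over the edge list instead of incremental appends.
import Mathlib
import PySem

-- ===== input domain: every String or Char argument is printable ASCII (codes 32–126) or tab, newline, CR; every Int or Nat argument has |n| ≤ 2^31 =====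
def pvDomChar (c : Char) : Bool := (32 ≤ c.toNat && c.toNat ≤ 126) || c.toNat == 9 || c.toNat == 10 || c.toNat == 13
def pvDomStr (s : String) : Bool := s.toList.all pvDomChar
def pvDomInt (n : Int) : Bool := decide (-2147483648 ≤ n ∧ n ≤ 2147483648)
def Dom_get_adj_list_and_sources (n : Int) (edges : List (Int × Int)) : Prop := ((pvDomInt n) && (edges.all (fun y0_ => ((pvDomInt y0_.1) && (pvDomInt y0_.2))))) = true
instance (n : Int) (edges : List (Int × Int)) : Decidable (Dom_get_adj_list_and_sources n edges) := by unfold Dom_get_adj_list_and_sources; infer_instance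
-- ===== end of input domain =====

-- B replaces A's single fused pass (dict-append plus boolean source flags) by an in-degree
-- counting pass and per-vertex grouping comprehensions (objective: alternative).

-- ===== PORT A =====
-- A's edge loop updates the dict and the boolean list together; ported as one fold over a pair state.
-- adj_list[v_start].append(v_end) is ported as Dict.modify with default [], and sources[v_end] = False
-- as pySetD: both are exact under Pre_ (v_start a key of the dict, v_end an in-range index,
-- negative indices wrapping as in Python).
def get_adj_list_and_sources (n : Int) (edges : List (Int × Int)) : (List (Int × List Int)) × List Int :=
  let adj0 : PySem.Dict Int (List Int) :=
    (PySem.List.pyRange 0 n 1).foldl (fun d i => d.insert i []) PySem.Dict.empty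
  let sources0 : List Bool := (PySem.List.pyRange 0 n 1).map (fun _ => true)
  let st := edges.foldl
    (fun (st : PySem.Dict Int (List Int) × List Bool) e =>
      (st.1.modify e.1 [] (fun l => l ++ [e.2]), PySem.List.pySetD st.2 e.2 false))
    (adj0, sources0)
  let sources := (PySem.List.pyRange 0 n 1).filter (fun i => PySem.List.pyGetD st.2 i false)
  (st.1.items, sources)

-- ===== PORT B =====
-- [0] * n is List.replicate n.toNat 0 (empty for n ≤ 0); indegree[t] += 1 is pySetD/pyGetD
-- (exact under Pre_: t in range, negative t wrapping as in Python); the dict comprehension has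
-- the distinct keys range(n), so its items are exactly the map below.
def get_adj_list_and_sources_alt (n : Int) (edges : List (Int × Int)) : (List (Int × List Int)) × List Int :=
  let indeg : List Int := edges.foldl
    (fun l e => PySem.List.pySetD l e.2 (PySem.List.pyGetD l e.2 0 + 1))
    (List.replicate n.toNat 0)
  ((PySem.List.pyRange 0 n 1).map
     (fun i => (i, (edges.filter (fun e => e.1 == i)).map (·.2))),
   (PySem.List.pyRange 0 n 1).filter (fun i => PySem.List.pyGetD indeg i 0 == 0))

-- ===== PRECONDITION & SPEC =====
-- Pre_ is exactly A's domain: A raises KeyError when some v_start is not a key (outside [0,n))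
-- and IndexError when some v_end is outside [-n,n); everywhere else A returns (a negative v_end
-- in [-n,0) wraps, in both programs alike).
def Pre_get_adj_list_and_sources (n : Int) (edges : List (Int × Int)) : Prop :=
  ∀ e ∈ edges, 0 ≤ e.1 ∧ e.1 < n ∧ -n ≤ e.2 ∧ e.2 < n
instance (n : Int) (edges : List (Int × Int)) : Decidable (Pre_get_adj_list_and_sources n edges) := by
  unfold Pre_get_adj_list_and_sources; infer_instance
def pvWitness_get_adj_list_and_sources : Int × (List (Int × Int)) := (3, [(0, 1), (1, 2), (0, 2)])

def Spec_get_adj_list_and_sources (n : Int) (edges : List (Int × Int)) (out : (List (Int × List Int)) × List Int) : Prop := out = get_adj_list_and_sources_alt n edges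
instance (n : Int) (edges : List (Int × Int)) (out : (List (Int × List Int)) × List Int) : Decidable (Spec_get_adj_list_and_sources n edges out) := by unfold Spec_get_adj_list_and_sources; infer_instance

-- ===== CLAIM (what is proved, stated in full; the proofs are below) =====
def Claim_equal_get_adj_list_and_sources : Prop := ∀ (n : Int) (edges : List (Int × Int)), Dom_get_adj_list_and_sources n edges → Pre_get_adj_list_and_sources n edges → Spec_get_adj_list_and_sources n edges (get_adj_list_and_sources n edges)

-- ===== LEMMAS AND PROOFS =====

-- the wrapped (Python) index of an in-range Int index, as a Nat
def pvWrap (len : Nat) (i : Int) : Nat := (if i < 0 then (len : Int) + i else i).toNat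

theorem pv_pyIdx_wrap (len : Nat) (i : Int) (h1 : -(len : Int) ≤ i) (h2 : i < len) :
    PySem.List.pyIdx? len i = some (pvWrap len i) := by
  unfold PySem.List.pyIdx? pvWrap
  by_cases h : 0 ≤ i
  · rw [if_pos h, if_pos h2, if_neg (show ¬ i < 0 by omega)]
  · rw [if_neg h, if_pos h1, if_pos (show i < 0 by omega)]
    congr 1
    omega

theorem pv_pySetD_wrap {α : Type} (xs : List α) (i : Int) (v : α)
    (h1 : -(xs.length : Int) ≤ i) (h2 : i < xs.length) :
    PySem.List.pySetD xs i v = xs.set (pvWrap xs.length i) v := by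
  unfold PySem.List.pySetD PySem.List.pySet?
  rw [pv_pyIdx_wrap _ _ h1 h2]
  rfl

theorem pv_pyGetD_wrap {α : Type} (xs : List α) (i : Int) (d : α)
    (h1 : -(xs.length : Int) ≤ i) (h2 : i < xs.length) :
    PySem.List.pyGetD xs i d = xs.getD (pvWrap xs.length i) d := by
  unfold PySem.List.pyGetD PySem.List.pyGet?
  rw [pv_pyIdx_wrap _ _ h1 h2, List.getD_eq_getElem?_getD]
  rfl

-- a fold over a pair whose components do not interact is the pair of the two folds
theorem pv_foldl_pair {α β γ : Type} (l : List γ) (f : α → γ → α) (g : β → γ → β)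
    (a : α) (b : β) :
    l.foldl (fun (p : α × β) e => (f p.1 e, g p.2 e)) (a, b) = (l.foldl f a, l.foldl g b) := by
  induction l generalizing a b with
  | nil => rfl
  | cons x xs ih => simpa using ih (f a x) (g b x)

-- updating a set with elements it already has leaves it unchanged
theorem pv_update_subset {α : Type} [BEq α] [LawfulBEq α] (l : List α) (s : PySem.Set α)
    (h : ∀ x ∈ l, x ∈ s) : PySem.Set.update s l = s := by
  induction l generalizing s with
  | nil => rfl
  | cons a t ih =>
    have hadd : PySem.Set.add s a = s := by
      have hc : PySem.Set.contains s a = true := by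
        rw [PySem.Set.contains_iff]; exact h a List.mem_cons_self
      simp only [PySem.Set.add, hc, if_true]
    show List.foldl PySem.Set.add (s.add a) t = s
    rw [hadd]
    exact ih s (fun x hx => h x (by simp [hx]))

-- A's flag fold over Int targets is a fold of plain sets at the wrapped Nat indices
theorem pv_flags_to_nat (edges : List (Int × Int)) (n : Nat) (s : List Bool)
    (hs : s.length = n) (hb : ∀ e ∈ edges, -(n : Int) ≤ e.2 ∧ e.2 < n) :
    edges.foldl (fun s (e : Int × Int) => PySem.List.pySetD s e.2 false) s
      = (edges.map (fun e => pvWrap n e.2)).foldl (fun s t => s.set t false) s := by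
  induction edges generalizing s with
  | nil => rfl
  | cons e es ih =>
    have he := hb e (by simp)
    rw [List.map_cons, List.foldl_cons, List.foldl_cons,
        pv_pySetD_wrap s e.2 false (by omega) (by omega), hs]
    exact ih _ (by simp [hs]) (fun e' h' => hb e' (by simp [h']))

-- B's in-degree fold over Int targets is a fold of plain set/get at the wrapped Nat indices
theorem pv_indeg_to_nat (edges : List (Int × Int)) (n : Nat) (c : List Int)
    (hc : c.length = n) (hb : ∀ e ∈ edges, -(n : Int) ≤ e.2 ∧ e.2 < n) :
    edges.foldl (fun l (e : Int × Int) => PySem.List.pySetD l e.2 (PySem.List.pyGetD l e.2 0 + 1)) c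
      = (edges.map (fun e => pvWrap n e.2)).foldl (fun l t => l.set t (l.getD t 0 + 1)) c := by
  induction edges generalizing c with
  | nil => rfl
  | cons e es ih =>
    have he := hb e (by simp)
    rw [List.map_cons, List.foldl_cons, List.foldl_cons,
        pv_pySetD_wrap c e.2 _ (by omega) (by omega),
        pv_pyGetD_wrap c e.2 0 (by omega) (by omega), hc]
    exact ih _ (by simp [hc]) (fun e' h' => hb e' (by simp [h']))

-- reading A's flag list after the Nat-index fold: true iff the index is no target
theorem pv_flags_nat (ts : List Nat) (s : List Bool) (k : Nat)
    (hts : ∀ t ∈ ts, t < s.length) :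
    (ts.foldl (fun s t => s.set t false) s).getD k false
      = if k ∈ ts then false else s.getD k false := by
  induction ts generalizing s with
  | nil => simp
  | cons t ts ih =>
    have ht := hts t (by simp)
    have hts' : ∀ t' ∈ ts, t' < (s.set t false).length := by
      intro t' h'; rw [List.length_set]; exact hts t' (by simp [h'])
    rw [List.foldl_cons, ih _ hts']
    have hstep : (s.set t false).getD k false = if k = t then false else s.getD k false := by
      by_cases hk : k = t
      · subst hk
        rw [if_pos rfl, List.getD_eq_getElem?_getD, List.getElem?_set_self ht]
        rfl
      · rw [if_neg hk, List.getD_eq_getElem?_getD,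
            List.getElem?_set_ne (show t ≠ k from fun h => hk h.symm),
            ← List.getD_eq_getElem?_getD]
    rw [hstep]
    by_cases hk : k = t <;> by_cases hm : k ∈ ts <;> simp [hk, hm]

-- reading B's in-degree list after the Nat-index fold: initial value plus the target count
theorem pv_indeg_nat (ts : List Nat) (c : List Int) (k : Nat)
    (hts : ∀ t ∈ ts, t < c.length) :
    (ts.foldl (fun l t => l.set t (l.getD t 0 + 1)) c).getD k 0
      = c.getD k 0 + (ts.count k : Int) := by
  induction ts generalizing c with
  | nil => simp
  | cons t ts ih =>
    have ht := hts t (by simp)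
    have hts' : ∀ t' ∈ ts, t' < (c.set t (c.getD t 0 + 1)).length := by
      intro t' h'; rw [List.length_set]; exact hts t' (by simp [h'])
    rw [List.foldl_cons, ih _ hts']
    have hstep : (c.set t (c.getD t 0 + 1)).getD k 0
        = if k = t then c.getD t 0 + 1 else c.getD k 0 := by
      by_cases hk : k = t
      · subst hk
        rw [if_pos rfl, List.getD_eq_getElem?_getD, List.getElem?_set_self ht]
        rfl
      · rw [if_neg hk, List.getD_eq_getElem?_getD,
            List.getElem?_set_ne (show t ≠ k from fun h => hk h.symm),
            ← List.getD_eq_getElem?_getD]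
    rw [hstep]
    by_cases hk : k = t
    · subst hk
      rw [if_pos rfl, List.count_cons_self]
      push_cast
      ring
    · rw [if_neg hk, List.count_cons_of_ne (show t ≠ k from fun h => hk h.symm)]

theorem pv_adj0_getD_aux (l : List Int) (d : PySem.Dict Int (List Int)) (k : Int)
    (h : ∀ k', d.getD k' [] = []) :
    (l.foldl (fun d i => d.insert i ([] : List Int)) d).getD k [] = [] := by
  induction l generalizing d with
  | nil => exact h k
  | cons a t ih =>
    rw [List.foldl_cons]
    exact ih _ (fun k' => by rw [PySem.Dict.getD_insert]; split_ifs <;> simp [h])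

-- A's adjacency dict after the edge loop: its items are B's per-vertex grouping map
theorem pv_items (n : Int) (edges : List (Int × Int))
    (hpre : ∀ e ∈ edges, 0 ≤ e.1 ∧ e.1 < n) :
    (edges.foldl (fun d (e : Int × Int) => d.modify e.1 [] (fun l => l ++ [e.2]))
        ((PySem.List.pyRange 0 n 1).foldl (fun d i => d.insert i ([] : List Int)) PySem.Dict.empty)).items
      = (PySem.List.pyRange 0 n 1).map
          (fun i => (i, (edges.filter (fun e => e.1 == i)).map (·.2))) := by
  set adj0 := (PySem.List.pyRange 0 n 1).foldl (fun d i => d.insert i ([] : List Int)) PySem.Dict.empty with hadj0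
  set F := edges.foldl (fun d (e : Int × Int) => d.modify e.1 [] (fun l => l ++ [e.2])) adj0 with hF
  have hkeys0 : adj0.keys = PySem.List.pyRange 0 n 1 := by
    have hitems0 : adj0.items = PySem.Dict.empty.items
        ++ (PySem.List.pyRange 0 n 1).map (fun i => (i, ([] : List Int))) := by
      exact PySem.Dict.items_foldl_insert_fresh (PySem.List.pyRange 0 n 1)
        (fun a => a) (fun _ => []) PySem.Dict.empty (fun a _ => by simp [PySem.Dict.contains_empty])
        (by simpa using PySem.List.nodup_pyRange_one 0 n)
    simp [PySem.Dict.keys, hitems0, PySem.Dict.empty, Function.comp_def]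
  have hkeysF : F.keys = PySem.List.pyRange 0 n 1 := by
    rw [hF, PySem.Dict.keys_foldl_modify_key edges (·.1) [] (fun _ e => (fun l => l ++ [e.2])) adj0,
        hkeys0, pv_update_subset]
    intro x hx
    obtain ⟨e, he, rfl⟩ := List.mem_map.mp hx
    rw [PySem.List.mem_pyRange_one]
    exact ⟨(hpre e he).1, (hpre e he).2⟩
  have hnodupF : F.keys.Nodup := by
    rw [hkeysF]; exact PySem.List.nodup_pyRange_one 0 n
  have hgetDF : ∀ k, F.getD k [] = (edges.filter (fun p => p.1 == k)).map (·.2) := by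
    intro k
    rw [hF, PySem.Dict.getD_foldl_modify_append, hadj0,
        pv_adj0_getD_aux _ _ _ (fun _ => by simp [PySem.Dict.getD_empty]), List.nil_append]
  rw [PySem.Dict.items_eq_map_keys F hnodupF [], hkeysF]
  exact List.map_congr_left (fun i _ => by rw [hgetDF])

-- ===== VERDICT (by name: the statement is the Claim_ definition above) =====
theorem get_adj_list_and_sources_spec : Claim_equal_get_adj_list_and_sources := by
  intro n edges _ hpre
  unfold Spec_get_adj_list_and_sources get_adj_list_and_sources get_adj_list_and_sources_alt
  simp only
  rw [pv_foldl_pair edges (fun (d : PySem.Dict Int (List Int)) (e : Int × Int) => d.modify e.1 [] (fun l => l ++ [e.2]))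
        (fun (s : List Bool) (e : Int × Int) => PySem.List.pySetD s e.2 false)]
  refine Prod.ext (pv_items n edges (fun e he => ⟨(hpre e he).1, (hpre e he).2.1⟩)) ?_
  apply List.filter_congr
  intro i hi
  rw [PySem.List.mem_pyRange_one] at hi
  have hb : ∀ e ∈ edges, -(n.toNat : Int) ≤ e.2 ∧ e.2 < n.toNat := by
    intro e he
    have h := hpre e he
    constructor <;> omega
  have hlenS : ((PySem.List.pyRange 0 n 1).map (fun _ => true)).length = n.toNat := by
    rw [List.length_map, PySem.List.length_pyRange_one]; omega
  have hlenC : (List.replicate n.toNat (0 : Int)).length = n.toNat := List.length_replicate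
  set ts := edges.map (fun e => pvWrap n.toNat e.2) with hts
  have htsb : ∀ t ∈ ts, t < n.toNat := by
    intro t ht
    obtain ⟨e, he, rfl⟩ := List.mem_map.mp ht
    have h := hb e he
    unfold pvWrap
    split_ifs <;> omega
  rw [pv_flags_to_nat edges n.toNat _ hlenS hb, pv_indeg_to_nat edges n.toNat _ hlenC hb]
  have hik : i = ((i.toNat : Nat) : Int) := by omega
  rw [hik, PySem.List.pyGetD_natCast, PySem.List.pyGetD_natCast]
  rw [pv_flags_nat ts _ i.toNat (by rw [hlenS]; exact htsb),
      pv_indeg_nat ts _ i.toNat (by rw [hlenC]; exact htsb)]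
  have hlt : i.toNat < n.toNat := by omega
  have hs0 : ((PySem.List.pyRange 0 n 1).map (fun _ => true)).getD i.toNat false = true := by
    simp [List.getD_eq_getElem?_getD, hlt]
  have hc0 : (List.replicate n.toNat (0 : Int)).getD i.toNat 0 = 0 := by
    simp [List.getD_eq_getElem?_getD, hlt]
  rw [hs0, hc0, zero_add]
  by_cases hm : i.toNat ∈ ts
  · have : ts.count i.toNat ≠ 0 := by
      rw [← List.count_pos_iff] at hm; omega
    rw [if_pos hm]
    have hz : ((ts.count i.toNat : Nat) : Int) ≠ 0 := by exact_mod_cast this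
    rw [show (((ts.count i.toNat : Nat) : Int) == 0) = false from beq_eq_false_iff_ne.mpr hz]
  · rw [if_neg hm, List.count_eq_zero_of_not_mem hm]
    decide
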